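-- pv_equiv track=rewrite | github.com/Gyeol0/TIL | Algorithm/List_practice/1979. Word_Position.py | Word_Position
-- ===== SOURCE A (Python) =====
-- def Word_Position(N, K, arr):
--     count = 0
--     # 단어는 오른쪽 또는 밑으로 이어진다.
--     dx = [1, 0]
--     dy = [0, 1]
--     for i in range(N):
--         for j in range(N):
--             # 출발지점 찾기
--             if arr[i][j] == 1:
--                 for p in range(2):
--                     # 벽이 아니거나 앞에 빈 칸이 있으면 안됨
--                     if i-dx[p] < 0 or j-dy[p] < 0 or arr[i-dx[p]][j-dy[p]] != 1:
--                         length = 1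
--                         x = i
--                         y = j
--                         # 오른쪽 또는 아래 방향으로 직진
--                         while 1:
--                             ax = x + dx[p]
--                             ay = y + dy[p]
--                             if 0 <= ax < N and 0 <= ay < N:
--                                 if arr[ax][ay] == 1:
--                                     length += 1
--                                     x = ax
--                                     y = ay
--                                     # 길이가 K 넘어가면 stop
--                                     if length > K:
--                                         break
--                                 else:
--                                     break
--                             else:
--                                 break
--                         # 길이 확인
--                         if length == K:
--                             count += 1
--     return count
-- ===== SOURCE B (Python) =====
-- def Word_Position(N, K, arr):
--     # simpler: one streaming run-counter pass per row and per column
--     count = 0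
--     lines = [[arr[i][j] for j in range(N)] for i in range(N)] + \
--             [[arr[i][j] for i in range(N)] for j in range(N)]
--     for line in lines:
--         run = 0
--         for v in line + [0]:  # sentinel closes a trailing run
--             if v == 1:
--                 run += 1
--             elif run:
--                 if run == K:
--                     count += 1
--                 run = 0
--     return count
-- ===== Notes on version B (the rewrite author's own statement) =====
-- stated objective: simpler
-- what changed: A searches every cell for a run start (predecessor check) and then walks the run forward with an inner while loop; B instead makes one streaming pass per row and per column keeping a run counter, counting each maximal run of 1s whose length is exactly K.
import Mathlib
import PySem

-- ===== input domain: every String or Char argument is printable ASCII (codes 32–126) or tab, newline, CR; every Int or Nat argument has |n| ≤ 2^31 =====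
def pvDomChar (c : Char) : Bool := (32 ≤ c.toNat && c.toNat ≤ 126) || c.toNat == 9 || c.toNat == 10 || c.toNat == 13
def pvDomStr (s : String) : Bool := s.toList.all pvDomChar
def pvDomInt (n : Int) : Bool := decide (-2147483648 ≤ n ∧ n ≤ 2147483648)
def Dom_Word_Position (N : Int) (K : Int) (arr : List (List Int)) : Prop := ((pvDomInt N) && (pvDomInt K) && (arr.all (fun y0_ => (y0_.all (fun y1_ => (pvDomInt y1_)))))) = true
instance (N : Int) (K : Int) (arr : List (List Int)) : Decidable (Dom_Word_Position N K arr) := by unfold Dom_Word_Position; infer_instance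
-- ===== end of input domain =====

-- B replaces A's per-cell run-start search with one streaming run-counter pass per row and per column (simpler, same O(N^2) cost).

-- arr[i][j]; all accesses the claim covers are in range (Pre_), so the defaults are never the value used
def pyCell (arr : List (List Int)) (i j : Int) : Int :=
  PySem.List.pyGetD (PySem.List.pyGetD arr i []) j 0

-- ===== PORT A =====
-- A's 'while 1' walk: extend the run in direction (dx,dy), stopping at a wall, a non-1 cell, or length > K
def wpRun (arr : List (List Int)) (N K dx dy : Int) (x y length : Int) : Nat → Int
  | 0 => length
  | fuel + 1 =>
    let ax := x + dx
    let ay := y + dy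
    if 0 ≤ ax ∧ ax < N ∧ 0 ≤ ay ∧ ay < N then
      if pyCell arr ax ay = 1 then
        if length + 1 > K then length + 1
        else wpRun arr N K dx dy ax ay (length + 1) fuel
      else length
    else length

def Word_Position (N : Int) (K : Int) (arr : List (List Int)) : Int :=
  let dx : List Int := [1, 0]
  let dy : List Int := [0, 1]
  (PySem.List.pyRange 0 N 1).foldl (fun count i =>
    (PySem.List.pyRange 0 N 1).foldl (fun count j =>
      if pyCell arr i j = 1 then
        (PySem.List.pyRange 0 2 1).foldl (fun count p =>
          let dxp := PySem.List.pyGetD dx p 0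
          let dyp := PySem.List.pyGetD dy p 0
          if i - dxp < 0 ∨ j - dyp < 0 ∨ pyCell arr (i - dxp) (j - dyp) ≠ 1 then
            if wpRun arr N K dxp dyp i j 1 N.toNat = K then count + 1 else count
          else count) count
      else count) count) 0

-- ===== PORT B =====
-- one step of B's streaming loop: state = (count, current run length)
def bstep (K : Int) (s : Int × Int) (v : Int) : Int × Int :=
  if v = 1 then (s.1, s.2 + 1)
  else if s.2 ≠ 0 then (if s.2 = K then s.1 + 1 else s.1, 0)
  else s

-- B's inner loop over one line (with the [0] sentinel closing a trailing run)
def wpLineCount (K : Int) (count : Int) (line : List Int) : Int :=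
  ((line ++ [0]).foldl (bstep K) (count, 0)).1

def Word_Position_alt (N : Int) (K : Int) (arr : List (List Int)) : Int :=
  let idx := PySem.List.pyRange 0 N 1
  let lines := idx.map (fun i => idx.map (fun j => pyCell arr i j))
            ++ idx.map (fun j => idx.map (fun i => pyCell arr i j))
  lines.foldl (wpLineCount K) 0

-- ===== PRECONDITION & SPEC =====
-- Pre_ excludes exactly the inputs where Python A raises IndexError: A reads arr[i][j] for all 0 ≤ i,j < N.
def Pre_Word_Position (N : Int) (K : Int) (arr : List (List Int)) : Prop :=
  N ≤ (arr.length : Int) ∧ ∀ row ∈ arr.take N.toNat, N ≤ (row.length : Int)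

instance (N : Int) (K : Int) (arr : List (List Int)) : Decidable (Pre_Word_Position N K arr) := by
  unfold Pre_Word_Position; infer_instance

def pvWitness_Word_Position : Int × Int × List (List Int) := (2, 2, [[1, 1], [0, 1]])

def Spec_Word_Position (N : Int) (K : Int) (arr : List (List Int)) (out : Int) : Prop := out = Word_Position_alt N K arr
instance (N : Int) (K : Int) (arr : List (List Int)) (out : Int) : Decidable (Spec_Word_Position N K arr out) := by unfold Spec_Word_Position; infer_instance

-- ===== CLAIM (what is proved, stated in full; the proofs are below) =====
def Claim_equal_Word_Position : Prop := ∀ (N : Int) (K : Int) (arr : List (List Int)), Dom_Word_Position N K arr → Pre_Word_Position N K arr → Spec_Word_Position N K arr (Word_Position N K arr)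

-- ===== LEMMAS AND PROOFS =====

-- length of the leading run of 1s of a line
def lead1 : List Int → Nat
  | [] => 0
  | x :: L => if x = 1 then lead1 L + 1 else 0

-- count of maximal runs of 1s of length exactly K, scanned left to right; pv = "previous cell was 1"
def lineAx (K : Int) (pv : Bool) : List Int → Int
  | [] => 0
  | x :: L => (if x = 1 ∧ pv = false ∧ ((lead1 L : Int) + 1 = K) then 1 else 0) + lineAx K (x == 1) L

-- A's while-loop value as a function of the list of cells ahead
def capRun (K : Int) : Int → List Int → Int
  | len, [] => len
  | len, x :: t => if x = 1 then (if len + 1 > K then len + 1 else capRun K (len + 1) t) else len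

-- A's per-start-cell contribution along the line f, at position j
def hTerm (N K : Int) (f : Int → Int) (j : Int) : Int :=
  if f j = 1 ∧ (j - 1 < 0 ∨ f (j - 1) ≠ 1) ∧ ((lead1 ((PySem.List.pyRange (j + 1) N 1).map f) : Int) + 1 = K) then 1 else 0

theorem capRun_eq_K (K : Int) : ∀ (t : List Int) (len : Int), 1 ≤ len →
    (capRun K len t = K ↔ (lead1 t : Int) + len = K) := by
  intro t
  induction t with
  | nil => intro len h; simp [capRun, lead1]
  | cons x t ih =>
    intro len h
    by_cases hx : x = 1
    · by_cases hb : len + 1 > K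
      · have hnn : (0:Int) ≤ (lead1 t : Int) := by positivity
        simp only [capRun, hx, if_pos hb, lead1]
        push_cast
        constructor <;> intro <;> omega
      · simp [capRun, hx, hb, lead1, ih (len + 1) (by omega)]
        push_cast; constructor <;> intro <;> omega
    · simp [capRun, hx, lead1]

theorem wpRun_horiz (arr : List (List Int)) (N K i : Int) (hi0 : 0 ≤ i) (hiN : i < N) :
    ∀ (m fuel : Nat) (j len : Int), 0 ≤ j → j + 1 + (m : Int) = N → m ≤ fuel →
    wpRun arr N K 0 1 i j len fuel
      = capRun K len ((PySem.List.pyRange (j + 1) N 1).map (pyCell arr i)) := by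
  intro m
  induction m with
  | zero =>
    intro fuel j len hj hN hf
    rw [PySem.List.pyRange_one_eq_nil (by omega)]
    cases fuel with
    | zero => simp [wpRun, capRun]
    | succ f => simp only [wpRun]; rw [if_neg (by omega)]; simp [capRun]
  | succ m ih =>
    intro fuel j len hj hN hf
    cases fuel with
    | zero => omega
    | succ f =>
      rw [PySem.List.pyRange_one_cons (by push_cast at hN ⊢; omega)]
      simp only [wpRun, List.map_cons, capRun, add_zero]
      rw [if_pos (by refine ⟨by omega, by push_cast at hN; omega, by omega, by omega⟩)]
      by_cases hc : pyCell arr i (j + 1) = 1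
      · rw [if_pos hc, if_pos hc]
        by_cases hb : len + 1 > K
        · rw [if_pos hb, if_pos hb]
        · rw [if_neg hb, if_neg hb,
            ih f (j + 1) (len + 1) (by omega) (by push_cast at hN ⊢; omega) (by omega)]
      · rw [if_neg hc, if_neg hc]

theorem wpRun_vert (arr : List (List Int)) (N K j : Int) (hj0 : 0 ≤ j) (hjN : j < N) :
    ∀ (m fuel : Nat) (i len : Int), 0 ≤ i → i + 1 + (m : Int) = N → m ≤ fuel →
    wpRun arr N K 1 0 i j len fuel
      = capRun K len ((PySem.List.pyRange (i + 1) N 1).map (fun x => pyCell arr x j)) := by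
  intro m
  induction m with
  | zero =>
    intro fuel i len hi hN hf
    rw [PySem.List.pyRange_one_eq_nil (by omega)]
    cases fuel with
    | zero => simp [wpRun, capRun]
    | succ f => simp only [wpRun]; rw [if_neg (by omega)]; simp [capRun]
  | succ m ih =>
    intro fuel i len hi hN hf
    cases fuel with
    | zero => omega
    | succ f =>
      rw [PySem.List.pyRange_one_cons (by push_cast at hN ⊢; omega)]
      simp only [wpRun, List.map_cons, capRun, add_zero]
      rw [if_pos (by refine ⟨by omega, by push_cast at hN; omega, by omega, by omega⟩)]
      by_cases hc : pyCell arr (i + 1) j = 1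
      · rw [if_pos hc, if_pos hc]
        by_cases hb : len + 1 > K
        · rw [if_pos hb, if_pos hb]
        · rw [if_neg hb, if_neg hb,
            ih f (i + 1) (len + 1) (by omega) (by push_cast at hN ⊢; omega) (by omega)]
      · rw [if_neg hc, if_neg hc]

-- A's start-cell scan over a line sums to the streaming count lineAx
theorem sum_hTerm (N K : Int) (f : Int → Int) :
    ∀ (m : Nat) (a : Int), 0 ≤ a → a + (m : Int) = N →
    ((PySem.List.pyRange a N 1).map (hTerm N K f)).sum
      = lineAx K (decide (0 ≤ a - 1) && (f (a - 1) == 1)) ((PySem.List.pyRange a N 1).map f) := by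
  intro m
  induction m with
  | zero =>
    intro a ha hN
    rw [PySem.List.pyRange_one_eq_nil (by omega)]
    simp [lineAx]
  | succ m ih =>
    intro a ha hN
    rw [PySem.List.pyRange_one_cons (by push_cast at hN ⊢; omega)]
    simp only [List.map_cons, List.sum_cons, lineAx]
    have hrec := ih (a + 1) (by omega) (by push_cast at hN ⊢; omega)
    have hpv : (decide (0 ≤ a + 1 - 1) && (f (a + 1 - 1) == 1)) = (f a == 1) := by
      simp [ha]
    rw [hrec, hpv]
    congr 1
    have hb : (a - 1 < 0 ∨ f (a - 1) ≠ 1) ↔ ((decide (0 ≤ a - 1) && (f (a - 1) == 1)) = false) := by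
      simp only [Bool.and_eq_false_iff, decide_eq_false_iff_not, not_le, beq_eq_false_iff_ne]
    unfold hTerm
    exact if_congr (and_congr_right' (and_congr_left' hb)) rfl rfl

-- B's sentinel fold computes lineAx
theorem bfold_spec (K : Int) : ∀ (L : List Int) (c r : Int),
    (r = 0 → ((L ++ [0]).foldl (bstep K) (c, r)).1 = c + lineAx K false L) ∧
    (1 ≤ r → ((L ++ [0]).foldl (bstep K) (c, r)).1
        = c + (if (lead1 L : Int) + r = K then 1 else 0) + lineAx K true L) := by
  intro L
  induction L with
  | nil =>
    intro c r
    constructor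
    · rintro rfl; simp [bstep, lineAx]
    · intro h
      simp only [List.nil_append, List.foldl_cons, List.foldl_nil, bstep, lead1]
      rw [if_neg (by omega), if_pos (by omega : r ≠ 0)]
      simp only [lineAx, Nat.cast_zero, zero_add]
      split_ifs <;> omega
  | cons x L ih =>
    intro c r
    rcases eq_or_ne x 1 with hx | hx
    · subst hx
      constructor
      · rintro rfl
        have hb : bstep K (c, 0) 1 = (c, 0 + 1) := by simp [bstep]
        rw [List.cons_append, List.foldl_cons, hb, (ih c (0 + 1)).2 (by omega)]
        simp only [lineAx, lead1]
        norm_num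
        split_ifs <;> omega
      · intro hr
        have hb : bstep K (c, r) 1 = (c, r + 1) := by simp [bstep]
        rw [List.cons_append, List.foldl_cons, hb, (ih c (r + 1)).2 (by omega)]
        simp only [lineAx, lead1]
        norm_num
        split_ifs <;> omega
    · constructor
      · rintro rfl
        have hb : bstep K (c, 0) x = (c, 0) := by simp [bstep, hx]
        rw [List.cons_append, List.foldl_cons, hb, (ih c 0).1 rfl]
        simp only [lineAx, show (x == 1) = false by simp [hx]]
        rw [if_neg (by tauto)]
        omega
      · intro hr
        have hb : bstep K (c, r) x = (if r = K then c + 1 else c, 0) := by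
          simp [bstep, hx]; omega
        rw [List.cons_append, List.foldl_cons, hb, (ih _ 0).1 rfl]
        simp only [lineAx, lead1, show (x == 1) = false by simp [hx],
          if_neg (by tauto : ¬(x = 1 ∧ (true = false) ∧ ((lead1 L : Int) + 1 = K)))]
        push_cast
        split_ifs <;> omega

theorem wpLineCount_eq (K c : Int) (L : List Int) :
    wpLineCount K c L = c + lineAx K false L :=
  (bfold_spec K L c 0).1 rfl

-- list Fubini for Int sums
theorem sum_sum_comm (l₁ l₂ : List Int) (g : Int → Int → Int) :
    (l₁.map (fun i => (l₂.map (fun j => g i j)).sum)).sum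
      = (l₂.map (fun j => (l₁.map (fun i => g i j)).sum)).sum := by
  induction l₁ with
  | nil => simp
  | cons a l ih =>
    simp only [List.map_cons, List.sum_cons, ih, PySem.List.sum_map_add_int]

theorem body_eq (N K : Int) (arr : List (List Int)) (i j c : Int)
    (hi0 : 0 ≤ i) (hiN : i < N) (hj0 : 0 ≤ j) (hjN : j < N) :
    (if pyCell arr i j = 1 then
      (PySem.List.pyRange 0 2 1).foldl (fun count p =>
        let dxp := PySem.List.pyGetD [1, 0] p 0
        let dyp := PySem.List.pyGetD [0, 1] p 0
        if i - dxp < 0 ∨ j - dyp < 0 ∨ pyCell arr (i - dxp) (j - dyp) ≠ 1 then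
          if wpRun arr N K dxp dyp i j 1 N.toNat = K then count + 1 else count
        else count) c
    else c)
    = c + (hTerm N K (fun x => pyCell arr x j) i + hTerm N K (pyCell arr i) j) := by
  by_cases hc : pyCell arr i j = 1
  · rw [if_pos hc]
    rw [show PySem.List.pyRange 0 2 1 = [0, 1] by decide]
    simp only [List.foldl_cons, List.foldl_nil,
      show PySem.List.pyGetD [(1:Int), 0] 0 0 = 1 from rfl,
      show PySem.List.pyGetD [(1:Int), 0] 1 0 = 0 from rfl,
      show PySem.List.pyGetD [(0:Int), 1] 0 0 = 0 from rfl,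
      show PySem.List.pyGetD [(0:Int), 1] 1 0 = 1 from rfl, sub_zero]
    have hstepV : ∀ c : Int,
        (if i - 1 < 0 ∨ j < 0 ∨ pyCell arr (i - 1) j ≠ 1 then
          if wpRun arr N K 1 0 i j 1 N.toNat = K then c + 1 else c
        else c) = c + hTerm N K (fun x => pyCell arr x j) i := by
      intro c
      have hv : wpRun arr N K 1 0 i j 1 N.toNat
          = capRun K 1 ((PySem.List.pyRange (i + 1) N 1).map (fun x => pyCell arr x j)) :=
        wpRun_vert arr N K j hj0 hjN (N - 1 - i).toNat N.toNat i 1 hi0 (by omega) (by omega)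
      have hcap := capRun_eq_K K ((PySem.List.pyRange (i + 1) N 1).map (fun x => pyCell arr x j)) 1 le_rfl
      unfold hTerm
      rw [hv]
      by_cases hs : i - 1 < 0 ∨ pyCell arr (i - 1) j ≠ 1
      · rw [if_pos (by tauto)]
        by_cases hk : capRun K 1 ((PySem.List.pyRange (i + 1) N 1).map (fun x => pyCell arr x j)) = K
        · rw [if_pos hk, if_pos ⟨hc, hs, by have := hcap.mp hk; omega⟩]
        · rw [if_neg hk, if_neg (by rintro ⟨-, -, h3⟩; exact hk (hcap.mpr (by omega))), add_zero]
      · push_neg at hs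
        rw [if_neg (by
            rintro (h | h | h)
            · omega
            · omega
            · exact h hs.2),
          if_neg (by
            rintro ⟨-, hs', -⟩
            rcases hs' with h | h
            · omega
            · exact h hs.2), add_zero]
    have hstepH : ∀ c : Int,
        (if i < 0 ∨ j - 1 < 0 ∨ pyCell arr i (j - 1) ≠ 1 then
          if wpRun arr N K 0 1 i j 1 N.toNat = K then c + 1 else c
        else c) = c + hTerm N K (pyCell arr i) j := by
      intro c
      have hv : wpRun arr N K 0 1 i j 1 N.toNat
          = capRun K 1 ((PySem.List.pyRange (j + 1) N 1).map (pyCell arr i)) :=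
        wpRun_horiz arr N K i hi0 hiN (N - 1 - j).toNat N.toNat j 1 hj0 (by omega) (by omega)
      have hcap := capRun_eq_K K ((PySem.List.pyRange (j + 1) N 1).map (pyCell arr i)) 1 le_rfl
      unfold hTerm
      rw [hv]
      by_cases hs : j - 1 < 0 ∨ pyCell arr i (j - 1) ≠ 1
      · rw [if_pos (by tauto)]
        by_cases hk : capRun K 1 ((PySem.List.pyRange (j + 1) N 1).map (pyCell arr i)) = K
        · rw [if_pos hk, if_pos ⟨hc, hs, by have := hcap.mp hk; omega⟩]
        · rw [if_neg hk, if_neg (by rintro ⟨-, -, h3⟩; exact hk (hcap.mpr (by omega))), add_zero]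
      · push_neg at hs
        rw [if_neg (by
            rintro (h | h | h)
            · omega
            · omega
            · exact h hs.2),
          if_neg (by
            rintro ⟨-, hs', -⟩
            rcases hs' with h | h
            · omega
            · exact h hs.2), add_zero]
    rw [hstepV c, hstepH (c + hTerm N K (fun x => pyCell arr x j) i)]
    ring
  · rw [if_neg hc]
    simp [hTerm, hc]

theorem nested_sum (R : List Int) (init : Int) (F : Int → Int → Int → Int) (G : Int → Int → Int)
    (h : ∀ i ∈ R, ∀ j ∈ R, ∀ c : Int, F i j c = c + G i j) :
    R.foldl (fun c i => R.foldl (fun c j => F i j c) c) init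
      = init + (R.map (fun i => (R.map (G i)).sum)).sum := by
  have h1 : ∀ i ∈ R, ∀ c : Int, R.foldl (fun c j => F i j c) c = c + (R.map (G i)).sum := by
    intro i hi c
    have h2 : R.foldl (fun c j => F i j c) c = R.foldl (fun c j => c + G i j) c :=
      PySem.List.foldl_congr_mem' _ _ _ _ (fun j hj acc => h i hi j hj acc)
    rw [h2, PySem.List.foldl_add]
  have h3 : R.foldl (fun c i => R.foldl (fun c j => F i j c) c) init
      = R.foldl (fun c i => c + (R.map (G i)).sum) init :=
    PySem.List.foldl_congr_mem' _ _ _ _ (fun i hi c => h1 i hi c)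
  rw [h3, PySem.List.foldl_add]

theorem A_eq_sum (N K : Int) (arr : List (List Int)) :
    Word_Position N K arr
      = ((PySem.List.pyRange 0 N 1).map (fun i =>
          ((PySem.List.pyRange 0 N 1).map (fun j =>
            hTerm N K (fun x => pyCell arr x j) i + hTerm N K (pyCell arr i) j)).sum)).sum := by
  simp only [Word_Position]
  refine Eq.trans (nested_sum (PySem.List.pyRange 0 N 1) 0
    (fun i j c => if pyCell arr i j = 1 then
      (PySem.List.pyRange 0 2 1).foldl (fun count p =>
        let dxp := PySem.List.pyGetD [1, 0] p 0
        let dyp := PySem.List.pyGetD [0, 1] p 0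
        if i - dxp < 0 ∨ j - dyp < 0 ∨ pyCell arr (i - dxp) (j - dyp) ≠ 1 then
          if wpRun arr N K dxp dyp i j 1 N.toNat = K then count + 1 else count
        else count) c
    else c)
    (fun i j => hTerm N K (fun x => pyCell arr x j) i + hTerm N K (pyCell arr i) j)
    ?_) (by simp)
  intro i hi j hj c
  obtain ⟨hi0, hiN⟩ := (PySem.List.mem_pyRange_one).mp hi
  obtain ⟨hj0, hjN⟩ := (PySem.List.mem_pyRange_one).mp hj
  exact body_eq N K arr i j c hi0 hiN hj0 hjN

theorem B_eq_sum (N K : Int) (arr : List (List Int)) :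
    Word_Position_alt N K arr
      = ((PySem.List.pyRange 0 N 1).map (fun i =>
          lineAx K false ((PySem.List.pyRange 0 N 1).map (fun j => pyCell arr i j)))).sum
      + ((PySem.List.pyRange 0 N 1).map (fun j =>
          lineAx K false ((PySem.List.pyRange 0 N 1).map (fun i => pyCell arr i j)))).sum := by
  simp only [Word_Position_alt]
  rw [show (wpLineCount K) = (fun (c : Int) (L : List Int) => c + lineAx K false L) from
    funext fun c => funext fun L => wpLineCount_eq K c L]
  rw [PySem.List.foldl_add]
  simp [List.map_map, Function.comp_def]

-- ===== VERDICT (by name: the statement is the Claim_ definition above) =====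
theorem Word_Position_spec : Claim_equal_Word_Position := by
  intro N K arr _ _
  unfold Spec_Word_Position
  rw [A_eq_sum, B_eq_sum]
  by_cases hN : 0 ≤ N
  · have hsplit : ∀ i : Int, ((PySem.List.pyRange 0 N 1).map (fun j =>
        hTerm N K (fun x => pyCell arr x j) i + hTerm N K (pyCell arr i) j)).sum
        = ((PySem.List.pyRange 0 N 1).map (fun j => hTerm N K (fun x => pyCell arr x j) i)).sum
          + ((PySem.List.pyRange 0 N 1).map (fun j => hTerm N K (pyCell arr i) j)).sum := by
      intro i; rw [PySem.List.sum_map_add_int]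
    have hcols : ∀ j : Int, ((PySem.List.pyRange 0 N 1).map (fun i =>
          hTerm N K (fun x => pyCell arr x j) i)).sum
        = lineAx K false ((PySem.List.pyRange 0 N 1).map (fun i => pyCell arr i j)) := by
      intro j
      have := sum_hTerm N K (fun x => pyCell arr x j) N.toNat 0 le_rfl (by omega)
      simpa using this
    have hrows : ∀ i : Int, ((PySem.List.pyRange 0 N 1).map (fun j =>
          hTerm N K (pyCell arr i) j)).sum
        = lineAx K false ((PySem.List.pyRange 0 N 1).map (fun j => pyCell arr i j)) := by
      intro i
      have := sum_hTerm N K (pyCell arr i) N.toNat 0 le_rfl (by omega)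
      simpa using this
    calc ((PySem.List.pyRange 0 N 1).map (fun i =>
            ((PySem.List.pyRange 0 N 1).map (fun j =>
              hTerm N K (fun x => pyCell arr x j) i + hTerm N K (pyCell arr i) j)).sum)).sum
        = ((PySem.List.pyRange 0 N 1).map (fun i =>
            ((PySem.List.pyRange 0 N 1).map (fun j => hTerm N K (fun x => pyCell arr x j) i)).sum)).sum
          + ((PySem.List.pyRange 0 N 1).map (fun i =>
            ((PySem.List.pyRange 0 N 1).map (fun j => hTerm N K (pyCell arr i) j)).sum)).sum := by
          simp only [hsplit]
          rw [PySem.List.sum_map_add_int]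
      _ = ((PySem.List.pyRange 0 N 1).map (fun i =>
            lineAx K false ((PySem.List.pyRange 0 N 1).map (fun j => pyCell arr i j)))).sum
          + ((PySem.List.pyRange 0 N 1).map (fun j =>
            lineAx K false ((PySem.List.pyRange 0 N 1).map (fun i => pyCell arr i j)))).sum := by
          rw [sum_sum_comm (PySem.List.pyRange 0 N 1) (PySem.List.pyRange 0 N 1)
            (fun i j => hTerm N K (fun x => pyCell arr x j) i)]
          rw [add_comm]
          congr 1
          · exact congrArg List.sum (List.map_congr_left (fun i _ => hrows i))
          · exact congrArg List.sum (List.map_congr_left (fun j _ => hcols j))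
  · rw [PySem.List.pyRange_one_eq_nil (by omega)]
    simp
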